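-- pv_equiv track=rewrite | github.com/hazeltr0n/freeworld-success-coach-portal | pdf_css_converter.py | convert_css_variables_for_xhtml2pdf
-- ===== SOURCE A (Python) =====
-- def convert_css_variables_for_xhtml2pdf(html: str) -> str:
--     """
--     Convert CSS variables to actual hex colors since xhtml2pdf doesn't support them
--
--     From your template's CSS variables:
--     --fw-roots: #004751
--     --fw-midnight: #191931
--     --fw-freedom-green: #CDF95C
--     --fw-horizon-grey: #F4F4F4
--     --fw-card-border: #CCCCCC
--     --font-primary: 'Outfit', sans-serif (fallback to Arial for xhtml2pdf)
--     """
--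
--     # FreeWorld brand color mapping
--     css_var_replacements = {
--         'var(--fw-roots)': '#004751',
--         'var(--fw-midnight)': '#191931',
--         'var(--fw-freedom-green)': '#CDF95C',
--         'var(--fw-horizon-grey)': '#F4F4F4',
--         'var(--fw-card-border)': '#CCCCCC',
--         'var(--fw-card-bg)': '#FAFAFA',
--         'var(--font-primary)': 'Arial, sans-serif'  # xhtml2pdf works better with Arial
--     }
--
--     # Replace all CSS variables with actual values
--     converted_html = html
--     for css_var, replacement in css_var_replacements.items():
--         converted_html = converted_html.replace(css_var, replacement)
--
--     return converted_html
-- ===== SOURCE B (Python) =====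
-- def convert_css_variables_for_xhtml2pdf(html: str) -> str:
--     """Single left-to-right scan: at each position emit the replacement of the
--     first matching CSS-variable token (skipping past it) or copy one character."""
--     table = (
--         ('var(--fw-roots)', '#004751'),
--         ('var(--fw-midnight)', '#191931'),
--         ('var(--fw-freedom-green)', '#CDF95C'),
--         ('var(--fw-horizon-grey)', '#F4F4F4'),
--         ('var(--fw-card-border)', '#CCCCCC'),
--         ('var(--fw-card-bg)', '#FAFAFA'),
--         ('var(--font-primary)', 'Arial, sans-serif'),
--     )
--     out = []
--     i = 0
--     n = len(html)
--     while i < n: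
--         for tok, rep in table:
--             if html.startswith(tok, i):
--                 out.append(rep)
--                 i += len(tok)
--                 break
--         else:
--             out.append(html[i])
--             i += 1
--     return ''.join(out)
-- ===== Notes on version B (the rewrite author's own statement) =====
-- stated objective: alternative
-- what changed: Replaces seven sequential full-string str.replace passes with one left-to-right scan that, at each position, emits the replacement of the first matching token (or copies the character), i.e. a simultaneous table-driven multi-replacement in a single pass.
import Mathlib
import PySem

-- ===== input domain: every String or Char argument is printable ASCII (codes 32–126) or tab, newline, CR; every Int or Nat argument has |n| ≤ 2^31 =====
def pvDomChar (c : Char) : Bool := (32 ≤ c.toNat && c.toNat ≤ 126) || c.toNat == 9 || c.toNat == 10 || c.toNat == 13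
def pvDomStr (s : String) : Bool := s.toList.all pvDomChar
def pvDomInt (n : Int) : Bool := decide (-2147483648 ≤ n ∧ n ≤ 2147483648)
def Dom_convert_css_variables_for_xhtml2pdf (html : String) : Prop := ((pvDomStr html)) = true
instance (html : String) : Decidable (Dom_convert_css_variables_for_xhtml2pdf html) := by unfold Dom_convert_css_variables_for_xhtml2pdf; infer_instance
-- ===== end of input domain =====

-- B replaces A's seven sequential full-string replace passes by one left-to-right scan
-- that at each position emits the replacement of the first matching token (objective: alternative).

-- ===== PORT A =====
-- A's dict literal (distinct keys, insertion order) as an association list.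
def cssVarReplacements : List (String × String) :=
  [("var(--fw-roots)", "#004751"),
   ("var(--fw-midnight)", "#191931"),
   ("var(--fw-freedom-green)", "#CDF95C"),
   ("var(--fw-horizon-grey)", "#F4F4F4"),
   ("var(--fw-card-border)", "#CCCCCC"),
   ("var(--fw-card-bg)", "#FAFAFA"),
   ("var(--font-primary)", "Arial, sans-serif")]

-- the for-loop over .items(): converted = converted.replace(css_var, replacement)
def convert_css_variables_for_xhtml2pdf (html : String) : String :=
  cssVarReplacements.foldl (fun converted kv => PySem.Str.replace converted kv.1 kv.2) html

-- ===== PORT B =====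
-- Source B's tuple table.
def pdfTable : List (String × String) :=
  [("var(--fw-roots)", "#004751"),
   ("var(--fw-midnight)", "#191931"),
   ("var(--fw-freedom-green)", "#CDF95C"),
   ("var(--fw-horizon-grey)", "#F4F4F4"),
   ("var(--fw-card-border)", "#CCCCCC"),
   ("var(--fw-card-bg)", "#FAFAFA"),
   ("var(--font-primary)", "Arial, sans-serif")]

def pdfTableL : List (List Char × List Char) :=
  pdfTable.map (fun p => (p.1.toList, p.2.toList))

-- the while loop over positions: first token of the table matching here (the for/break),
-- else copy one character (the for's else branch).
def scanB : List Char → List Char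
  | [] => []
  | c :: t =>
    match pdfTableL.find? (fun p => p.1.isPrefixOf (c :: t)) with
    | some p => p.2 ++ scanB (t.drop (p.1.length - 1))
    | none => c :: scanB t
termination_by l => l.length
decreasing_by
  all_goals simp

def convert_css_variables_for_xhtml2pdf_alt (html : String) : String :=
  String.ofList (scanB html.toList)

-- ===== PRECONDITION & SPEC =====
def Spec_convert_css_variables_for_xhtml2pdf (html : String) (out : String) : Prop := out = convert_css_variables_for_xhtml2pdf_alt html
instance (html : String) (out : String) : Decidable (Spec_convert_css_variables_for_xhtml2pdf html out) := by unfold Spec_convert_css_variables_for_xhtml2pdf; infer_instance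

-- ===== CLAIM (what is proved, stated in full; the proofs are below) =====
def Claim_equal_convert_css_variables_for_xhtml2pdf : Prop := ∀ (html : String), Dom_convert_css_variables_for_xhtml2pdf html → Spec_convert_css_variables_for_xhtml2pdf html (convert_css_variables_for_xhtml2pdf html)

-- ===== LEMMAS AND PROOFS =====

-- Structural version of Python's str.replace (left-to-right, non-overlapping).
def repl (old new : List Char) : List Char → List Char
  | [] => []
  | c :: t =>
    if old.isPrefixOf (c :: t) then new ++ repl old new (t.drop (old.length - 1))
    else c :: repl old new t
termination_by l => l.length
decreasing_by
  all_goals simp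

lemma repl_nil (old new : List Char) : repl old new [] = [] := by
  rw [repl]

lemma repl_cons_of_not_prefix {old : List Char} (new : List Char) {c : Char} {t : List Char}
    (h : ¬ old <+: c :: t) : repl old new (c :: t) = c :: repl old new t := by
  rw [repl]
  simp [List.isPrefixOf_iff_prefix, h]

lemma repl_append_of_prefix {old : List Char} (new : List Char) {c : Char} {t : List Char}
    (h : old <+: c :: t) : repl old new (c :: t) = new ++ repl old new (t.drop (old.length - 1)) := by
  rw [repl]
  simp [List.isPrefixOf_iff_prefix, h]

lemma go_eq_repl (old new : List Char) (hold : old ≠ []) :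
    ∀ (fuel : Nat) (l acc : List Char), l.length ≤ fuel →
      PySem.Chars.replace.go old new fuel l acc = acc.reverse ++ repl old new l := by
  intro fuel
  induction fuel with
  | zero =>
    intro l acc hl
    have hnil : l = [] := List.eq_nil_of_length_eq_zero (Nat.le_zero.mp hl)
    subst hnil
    rw [PySem.Chars.replace.go]
    simp [repl_nil]
  | succ fuel IH =>
    intro l acc hl
    cases l with
    | nil =>
      rw [PySem.Chars.replace.go]
      · simp [repl_nil]
      · omega
    | cons c t =>
      rw [PySem.Chars.replace.go]
      by_cases h : old.isPrefixOf (c :: t)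
      · simp only [h, if_true]
        obtain ⟨d, od, hod⟩ : ∃ d od, old = d :: od := by
          cases old with
          | nil => exact absurd rfl hold
          | cons d od => exact ⟨d, od, rfl⟩
        have hdrop : List.drop old.length (c :: t) = t.drop (old.length - 1) := by
          subst hod; simp
        have hol : 0 < old.length := List.length_pos_iff.mpr hold
        have hlt : t.length + 1 ≤ fuel + 1 := by simpa using hl
        rw [hdrop, IH (t.drop (old.length - 1)) (new.reverse ++ acc)
          (by simp only [List.length_drop]; omega)]
        rw [repl_append_of_prefix new (List.isPrefixOf_iff_prefix.mp h)]
        simp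
      · simp only [h]
        rw [IH t (c :: acc) (by simpa using hl)]
        rw [repl_cons_of_not_prefix new (fun hp => h (List.isPrefixOf_iff_prefix.mpr hp))]
        simp

lemma replace_eq_repl (old new l : List Char) (hold : old ≠ []) :
    PySem.Chars.replace l old new = repl old new l := by
  rw [PySem.Chars.replace]
  rw [if_neg (by simp [hold])]
  simpa using go_eq_repl old new hold l.length l [] le_rfl

-- A's fold over char lists.
def chainF (PS : List (List Char × List Char)) (l : List Char) : List Char :=
  PS.foldl (fun s p => repl p.1 p.2 s) l

lemma chainF_cons (q : List Char × List Char) (PS : List (List Char × List Char)) (l : List Char) :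
    chainF (q :: PS) l = chainF PS (repl q.1 q.2 l) := by
  simp [chainF]

-- The structure of the table that makes sequential replacement equal the simultaneous scan:
-- every token is 'v' followed by characters that are not 'v', '#' or 'A';
-- every replacement is nonempty, '#'- or 'A'-headed, and contains no 'v'.
def GoodPair (p : List Char × List Char) : Prop :=
  p.1.head? = some 'v' ∧ (∀ c ∈ p.1.tail, c ≠ 'v' ∧ c ≠ '#' ∧ c ≠ 'A') ∧
  p.2 ≠ [] ∧ (∀ c ∈ p.2, c ≠ 'v') ∧ (p.2.head? = some '#' ∨ p.2.head? = some 'A')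

lemma good_token_cons {p : List Char × List Char} (hp : GoodPair p) :
    ∃ m, p.1 = 'v' :: m ∧ (∀ c ∈ m, c ≠ 'v' ∧ c ≠ '#' ∧ c ≠ 'A') := by
  obtain ⟨h1, h2, -⟩ := hp
  cases hm : p.1 with
  | nil => rw [hm] at h1; simp at h1
  | cons d m =>
    rw [hm] at h1 h2
    simp at h1
    exact ⟨m, by rw [h1], by simpa using h2⟩

-- a 'v'-headed token never matches inside 'v'-free text
lemma repl_nov {q : List Char × List Char} (hq : q.1.head? = some 'v')
    (x y : List Char) (hx : ∀ c ∈ x, c ≠ 'v') :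
    repl q.1 q.2 (x ++ y) = x ++ repl q.1 q.2 y := by
  induction x with
  | nil => simp
  | cons c x ih =>
    have hc : c ≠ 'v' := hx c (by simp)
    have hnp : ¬ q.1 <+: c :: (x ++ y) := by
      intro hpre
      cases hq1 : q.1 with
      | nil => rw [hq1] at hq; simp at hq
      | cons d r =>
        rw [hq1] at hq hpre
        simp at hq
        rw [List.cons_prefix_cons] at hpre
        exact hc (hpre.1 ▸ hq ▸ rfl)
    rw [List.cons_append, repl_cons_of_not_prefix _ hnp,
      ih (fun c hc' => hx c (List.mem_cons_of_mem _ hc'))]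
    simp

-- a token of the table never matches starting inside another full token occurrence
lemma repl_passtok {p q : List Char × List Char} (hp : GoodPair p)
    (hqv : q.1.head? = some 'v')
    (hqp : ¬ q.1 <+: p.1) (hpq : ¬ p.1 <+: q.1) (X : List Char) :
    repl q.1 q.2 (p.1 ++ X) = p.1 ++ repl q.1 q.2 X := by
  obtain ⟨m, hm, hmchars⟩ := good_token_cons hp
  have hnp : ¬ q.1 <+: p.1 ++ X := by
    intro hcon
    rcases Nat.le_total q.1.length p.1.length with hle | hle
    · exact hqp (List.prefix_of_prefix_length_le hcon (List.prefix_append _ _) hle)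
    · exact hpq (List.prefix_of_prefix_length_le (List.prefix_append _ _) hcon hle)
  have hnp' : ¬ q.1 <+: 'v' :: (m ++ X) := by
    rw [← List.cons_append, ← hm]; exact hnp
  rw [hm, List.cons_append, repl_cons_of_not_prefix q.2 hnp',
    repl_nov hqv m X (fun c hc => (hmchars c hc).1)]
  simp

-- replacement creates no new token-tail prefixes
lemma pref_of_repl {q : List Char × List Char} (hq : GoodPair q) :
    ∀ (n : Nat) (z m : List Char), z.length ≤ n → (∀ c ∈ m, c ≠ '#' ∧ c ≠ 'A') →
      m <+: repl q.1 q.2 z → m <+: z := by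
  intro n
  induction n with
  | zero =>
    intro z m hz _ hm
    have hnil : z = [] := List.eq_nil_of_length_eq_zero (Nat.le_zero.mp hz)
    subst hnil
    rwa [repl_nil] at hm
  | succ n IH =>
    intro z m hz hchars hm
    cases z with
    | nil => rwa [repl_nil] at hm
    | cons c t =>
      by_cases hpre : q.1 <+: c :: t
      · rw [repl_append_of_prefix _ hpre] at hm
        cases m with
        | nil => exact List.nil_prefix
        | cons e m' =>
          exfalso
          obtain ⟨-, -, hne, -, hhead⟩ := hq
          cases hq2 : q.2 with
          | nil => exact hne hq2
          | cons d r =>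
            rw [hq2] at hm hhead
            rw [List.cons_append, List.cons_prefix_cons] at hm
            have he := hchars e (by simp)
            rcases hhead with h | h <;> simp at h <;>
              exact absurd (hm.1.trans h) (by simp [he.1, he.2])
      · rw [repl_cons_of_not_prefix _ hpre] at hm
        cases m with
        | nil => exact List.nil_prefix
        | cons e m' =>
          rw [List.cons_prefix_cons] at hm ⊢
          exact ⟨hm.1, IH t m' (by simpa using hz)
            (fun c hc => hchars c (List.mem_cons_of_mem _ hc)) hm.2⟩

lemma chainF_nil : ∀ (PS : List (List Char × List Char)), chainF PS [] = [] := by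
  intro PS
  induction PS with
  | nil => simp [chainF]
  | cons q PS ih => rw [chainF_cons, repl_nil]; exact ih

lemma chainF_nov : ∀ (PS : List (List Char × List Char)), (∀ p ∈ PS, GoodPair p) →
    ∀ (x : List Char), (∀ c ∈ x, c ≠ 'v') →
    ∀ y, chainF PS (x ++ y) = x ++ chainF PS y := by
  intro PS
  induction PS with
  | nil => intro _ x _ y; simp [chainF]
  | cons q PS ih =>
    intro hG x hx y
    have hG' : ∀ p ∈ PS, GoodPair p := fun p hp => hG p (List.mem_cons_of_mem _ hp)
    rw [chainF_cons, repl_nov (hG q (by simp)).1 x y hx, ih hG' x hx, chainF_cons]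

lemma chainF_match : ∀ (PS : List (List Char × List Char)), (∀ p ∈ PS, GoodPair p) →
    ∀ (p : List Char × List Char), p ∈ PS →
    (∀ q ∈ PS, q ≠ p → ¬ q.1 <+: p.1 ∧ ¬ p.1 <+: q.1) →
    ∀ X, chainF PS (p.1 ++ X) = p.2 ++ chainF PS X := by
  intro PS
  induction PS with
  | nil => intro _ p hp; exact absurd hp (by simp)
  | cons q PS ih =>
    intro hG p hp hpair X
    have hG' : ∀ r ∈ PS, GoodPair r := fun r hr => hG r (List.mem_cons_of_mem _ hr)
    by_cases hqp : q = p
    · subst hqp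
      obtain ⟨m, hm, -⟩ := good_token_cons (hG q (by simp))
      have hrepl : repl q.1 q.2 (q.1 ++ X) = q.2 ++ repl q.1 q.2 X := by
        have hpre : q.1 <+: 'v' :: (m ++ X) := by
          rw [← List.cons_append, ← hm]; exact List.prefix_append _ _
        have hdropX : (m ++ X).drop (q.1.length - 1) = X := by
          rw [hm]
          simp
        conv_lhs => rw [show q.1 ++ X = 'v' :: (m ++ X) by rw [hm, List.cons_append]]
        rw [repl_append_of_prefix q.2 hpre, hdropX]
      rw [chainF_cons, hrepl,
        chainF_nov PS hG' q.2 (fun c hc => (hG q (by simp)).2.2.2.1 c hc) _, chainF_cons]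
    · have hp' : p ∈ PS := by
        rcases List.mem_cons.mp hp with rfl | h
        · exact absurd rfl hqp
        · exact h
      have hpair' : ∀ r ∈ PS, r ≠ p → ¬ r.1 <+: p.1 ∧ ¬ p.1 <+: r.1 :=
        fun r hr hne => hpair r (List.mem_cons_of_mem _ hr) hne
      obtain ⟨h1, h2⟩ := hpair q (by simp) hqp
      rw [chainF_cons, repl_passtok (hG p hp) (hG q (by simp)).1 h1 h2,
        ih hG' p hp' hpair', chainF_cons]

lemma chainF_nomatch : ∀ (PS : List (List Char × List Char)), (∀ p ∈ PS, GoodPair p) →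
    ∀ (c : Char) (t : List Char), (∀ q ∈ PS, ¬ q.1 <+: c :: t) →
    chainF PS (c :: t) = c :: chainF PS t := by
  intro PS
  induction PS with
  | nil => intro _ c t _; simp [chainF]
  | cons q PS ih =>
    intro hG c t h
    have hG' : ∀ p ∈ PS, GoodPair p := fun p hp => hG p (List.mem_cons_of_mem _ hp)
    have h1 : ¬ q.1 <+: c :: t := h q (by simp)
    have hnew : ∀ p ∈ PS, ¬ p.1 <+: c :: repl q.1 q.2 t := by
      intro p hp hcon
      obtain ⟨m, hm, hmchars⟩ := good_token_cons (hG' p hp)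
      rw [hm, List.cons_prefix_cons] at hcon
      have hmt : m <+: t :=
        pref_of_repl (hG q (by simp)) t.length t m le_rfl
          (fun c hc => ⟨(hmchars c hc).2.1, (hmchars c hc).2.2⟩) hcon.2
      exact h p (List.mem_cons_of_mem _ hp) (by rw [hm, ← hcon.1, List.cons_prefix_cons]; exact ⟨rfl, hmt⟩)
    rw [chainF_cons, repl_cons_of_not_prefix _ h1, ih hG' c _ hnew, chainF_cons]

-- the table with its string literals evaluated to character lists
def pdfTableC : List (List Char × List Char) :=
  [(['v', 'a', 'r', '(', '-', '-', 'f', 'w', '-', 'r', 'o', 'o', 't', 's', ')'],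
    ['#', '0', '0', '4', '7', '5', '1']),
   (['v', 'a', 'r', '(', '-', '-', 'f', 'w', '-', 'm', 'i', 'd', 'n', 'i', 'g', 'h', 't', ')'],
    ['#', '1', '9', '1', '9', '3', '1']),
   (['v', 'a', 'r', '(', '-', '-', 'f', 'w', '-', 'f', 'r', 'e', 'e', 'd', 'o', 'm', '-', 'g', 'r', 'e', 'e', 'n', ')'],
    ['#', 'C', 'D', 'F', '9', '5', 'C']),
   (['v', 'a', 'r', '(', '-', '-', 'f', 'w', '-', 'h', 'o', 'r', 'i', 'z', 'o', 'n', '-', 'g', 'r', 'e', 'y', ')'],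
    ['#', 'F', '4', 'F', '4', 'F', '4']),
   (['v', 'a', 'r', '(', '-', '-', 'f', 'w', '-', 'c', 'a', 'r', 'd', '-', 'b', 'o', 'r', 'd', 'e', 'r', ')'],
    ['#', 'C', 'C', 'C', 'C', 'C', 'C']),
   (['v', 'a', 'r', '(', '-', '-', 'f', 'w', '-', 'c', 'a', 'r', 'd', '-', 'b', 'g', ')'],
    ['#', 'F', 'A', 'F', 'A', 'F', 'A']),
   (['v', 'a', 'r', '(', '-', '-', 'f', 'o', 'n', 't', '-', 'p', 'r', 'i', 'm', 'a', 'r', 'y', ')'],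
    ['A', 'r', 'i', 'a', 'l', ',', ' ', 's', 'a', 'n', 's', '-', 's', 'e', 'r', 'i', 'f'])]

set_option maxRecDepth 40000 in
lemma pdfTableL_eq : pdfTableL = pdfTableC := by decide

lemma good_pdfTableL : ∀ p ∈ pdfTableL, GoodPair p := by
  intro p hp
  rw [pdfTableL_eq] at hp
  simp only [pdfTableC, List.mem_cons, List.not_mem_nil, or_false] at hp
  rcases hp with rfl | rfl | rfl | rfl | rfl | rfl | rfl <;>
    exact ⟨by simp, by simp, by simp, by simp, by simp⟩

lemma pairwise_pdfTableL : ∀ p ∈ pdfTableL, ∀ q ∈ pdfTableL, p ≠ q → ¬ p.1 <+: q.1 := by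
  intro p hp q hq
  rw [pdfTableL_eq] at hp hq
  simp only [pdfTableC, List.mem_cons, List.not_mem_nil, or_false] at hp hq
  rcases hp with rfl | rfl | rfl | rfl | rfl | rfl | rfl <;>
    rcases hq with rfl | rfl | rfl | rfl | rfl | rfl | rfl <;>
      simp [List.cons_prefix_cons]

-- the main induction: the sequential chain equals the one-pass scan
lemma chainF_eq_scanB : ∀ (n : Nat) (l : List Char), l.length ≤ n →
    chainF pdfTableL l = scanB l := by
  intro n
  induction n with
  | zero =>
    intro l hl
    have hnil : l = [] := List.eq_nil_of_length_eq_zero (Nat.le_zero.mp hl)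
    subst hnil
    rw [chainF_nil, scanB]
  | succ n ih =>
    intro l hl
    cases l with
    | nil => rw [chainF_nil, scanB]
    | cons c t =>
      rw [scanB]
      cases hf : pdfTableL.find? (fun p => p.1.isPrefixOf (c :: t)) with
      | some p =>
        have hpmem := List.mem_of_find?_eq_some hf
        have hppre : p.1 <+: c :: t := List.isPrefixOf_iff_prefix.mp (by simpa using List.find?_some hf)
        obtain ⟨m, hm, -⟩ := good_token_cons (good_pdfTableL p hpmem)
        obtain ⟨rest, hrest⟩ := hppre
        have hct : c :: t = p.1 ++ rest := hrest.symm
        have hdrop : t.drop (p.1.length - 1) = rest := by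
          rw [hm] at hct ⊢
          simp at hct
          rw [hct.2]
          simp
        dsimp only
        rw [hct, chainF_match pdfTableL good_pdfTableL p hpmem
          (fun q hq hne => ⟨pairwise_pdfTableL q hq p hpmem hne,
            pairwise_pdfTableL p hpmem q hq (fun h => hne h.symm)⟩) rest]
        rw [hdrop]
        congr 1
        apply ih
        have : t.length ≤ n := by simpa using hl
        have : rest.length ≤ t.length := by
          have := congrArg List.length hct
          rw [hm] at this
          simp at this
          omega
        omega
      | none =>
        have hno : ∀ q ∈ pdfTableL, ¬ q.1 <+: c :: t := by
          intro q hq hcon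
          have := List.find?_eq_none.mp hf q hq
          simp only [List.isPrefixOf_iff_prefix] at this
          exact this hcon
        dsimp only
        rw [chainF_nomatch pdfTableL good_pdfTableL c t hno]
        congr 1
        exact ih t (by simpa using hl)

set_option maxRecDepth 40000 in
lemma A_toList (html : String) :
    (convert_css_variables_for_xhtml2pdf html).toList = chainF pdfTableL html.toList := by
  simp only [convert_css_variables_for_xhtml2pdf, cssVarReplacements, chainF, pdfTableL, pdfTable,
    List.map, List.foldl, PySem.Str.toList_replace]
  rw [replace_eq_repl "var(--fw-roots)".toList "#004751".toList _ (by decide)]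
  rw [replace_eq_repl "var(--fw-midnight)".toList "#191931".toList _ (by decide)]
  rw [replace_eq_repl "var(--fw-freedom-green)".toList "#CDF95C".toList _ (by decide)]
  rw [replace_eq_repl "var(--fw-horizon-grey)".toList "#F4F4F4".toList _ (by decide)]
  rw [replace_eq_repl "var(--fw-card-border)".toList "#CCCCCC".toList _ (by decide)]
  rw [replace_eq_repl "var(--fw-card-bg)".toList "#FAFAFA".toList _ (by decide)]
  rw [replace_eq_repl "var(--font-primary)".toList "Arial, sans-serif".toList _ (by decide)]

-- ===== VERDICT (by name: the statement is the Claim_ definition above) =====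
theorem convert_css_variables_for_xhtml2pdf_spec : Claim_equal_convert_css_variables_for_xhtml2pdf := by
  intro html _
  unfold Spec_convert_css_variables_for_xhtml2pdf convert_css_variables_for_xhtml2pdf_alt
  apply String.toList_inj.mp
  rw [A_toList, chainF_eq_scanB html.toList.length html.toList le_rfl]
  simp
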